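-- pv_equiv track=rewrite | github.com/xuzhougeng/HCR_designer | src/common/sequence_utils.py | check_complementarity
-- ===== SOURCE A (Python) =====
-- from typing import Dict, List
--
-- def is_complementary(seq1, seq2):
--     """检查两个序列是否互补
--
--     ATGC 和 TACG 是互补的
--
--     Parameters:
--     -----------
--     seq1 : str
--         序列1
--     seq2 : str
--         序列2
--
--     Returns:
--     --------
--     bool: 如果序列互补则返回True，否则返回False
--     """
--     if len(seq1) != len(seq2):
--         return False
--     pairs = {'A': 'T', 'T': 'A', 'C': 'G', 'G': 'C'}
--     for b1, b2 in zip(seq1, seq2):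
--         if b2 != pairs.get(b1):
--             return False
--     return True
--
-- def check_complementarity(seq1: str, seq2: str, min_complementary_length: int = 4) -> Dict[str, bool]:
--     """检查两个序列序列之间的互补性"""
--     len1, len2 = len(seq1), len(seq2)
--
--     # 检查局部互补性
--     for i in range(len1 - min_complementary_length + 1):
--         for j in range(len2 - min_complementary_length + 1):
--             if is_complementary(seq1[i:i+min_complementary_length],
--                               seq2[j:j+min_complementary_length][::-1]):
--                 return {'has_complementarity': True, 'end_complementarity': False}
--
--     # 检查3'端互补性
--     end_length = min(5, min_complementary_length)
--     end_complementarity = is_complementary(seq1[-end_length:], seq2[-end_length:][::-1])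
--
--     return {
--         'has_complementarity': False,
--         'end_complementarity': end_complementarity
--     }
-- ===== SOURCE B (Python) =====
-- def check_complementarity(seq1: str, seq2: str, min_complementary_length: int = 4):
--     """Set-based re-implementation: compare reverse-complemented k-mers of seq1
--     against the set of k-mers of seq2 instead of an all-pairs scan."""
--     k = min_complementary_length
--     if k <= 0:
--         # every window of non-positive length is empty, hence vacuously complementary
--         return {'has_complementarity': True, 'end_complementarity': False}
--     comp = {'A': 'T', 'T': 'A', 'C': 'G', 'G': 'C'}
--
--     def revcomp(s):
--         out = []
--         for c in reversed(s):
--             if c not in comp: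
--                 return None
--             out.append(comp[c])
--         return ''.join(out)
--
--     kmers2 = {seq2[j:j+k] for j in range(len(seq2) - k + 1)}
--     for i in range(len(seq1) - k + 1):
--         rc = revcomp(seq1[i:i+k])
--         if rc is not None and rc in kmers2:
--             return {'has_complementarity': True, 'end_complementarity': False}
--
--     e = min(5, k)
--     t1, t2 = seq1[-e:], seq2[-e:]
--     end = len(t1) == len(t2) and revcomp(t1) == t2
--     return {'has_complementarity': False, 'end_complementarity': end}
-- ===== Notes on version B (the rewrite author's own statement) =====
-- stated objective: faster
-- what changed: Replaced the all-pairs window-by-window comparison with a hash set of seq2's k-mers probed once by each reverse-complemented k-mer of seq1.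
import Mathlib
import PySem

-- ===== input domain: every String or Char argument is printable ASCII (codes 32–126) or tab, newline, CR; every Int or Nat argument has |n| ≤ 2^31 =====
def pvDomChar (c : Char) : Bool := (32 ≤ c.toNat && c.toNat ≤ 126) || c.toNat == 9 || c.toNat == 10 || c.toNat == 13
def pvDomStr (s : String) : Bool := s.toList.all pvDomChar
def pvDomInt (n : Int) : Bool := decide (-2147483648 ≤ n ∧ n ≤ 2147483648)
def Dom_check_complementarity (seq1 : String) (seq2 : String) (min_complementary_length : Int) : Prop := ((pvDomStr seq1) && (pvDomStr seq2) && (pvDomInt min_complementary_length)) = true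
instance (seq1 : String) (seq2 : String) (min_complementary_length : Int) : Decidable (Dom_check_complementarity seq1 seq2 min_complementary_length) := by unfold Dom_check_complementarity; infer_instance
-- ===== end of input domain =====

-- B replaces A's all-pairs window scan by a set of seq2's k-mers probed by each
-- reverse-complemented k-mer of seq1 (objective: faster, asymptotic).

-- ===== PORT A =====
-- the dict 'pairs' of is_complementary
def pvPairs : PySem.Dict Char Char := PySem.Dict.mk [('A','T'), ('T','A'), ('C','G'), ('G','C')]

-- the 'for b1, b2 in zip(seq1, seq2)' loop with its early 'return False'
def pvIsCompLoop : List (Char × Char) → Bool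
  | [] => true
  | (b1, b2) :: rest =>
      if (some b2 == pvPairs.get? b1) = false then false else pvIsCompLoop rest

-- is_complementary(seq1, seq2) on char lists
def is_complementary (s1 : List Char) (s2 : List Char) : Bool :=
  if s1.length ≠ s2.length then false
  else pvIsCompLoop (s1.zip s2)

-- seq[a:b][::-1] is (slice).reverse (PySem.List.slice?_none_none_neg_one)
def check_complementarity (seq1 : String) (seq2 : String) (min_complementary_length : Int) : List (String × Bool) :=
  let s1 := seq1.toList
  let s2 := seq2.toList
  let len1 : Int := s1.length
  let len2 : Int := s2.length
  -- nested 'for i … for j …' with an early return: any/any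
  if (PySem.List.pyRange 0 (len1 - min_complementary_length + 1) 1).any (fun i =>
       (PySem.List.pyRange 0 (len2 - min_complementary_length + 1) 1).any (fun j =>
         is_complementary (PySem.List.slice s1 (some i) (some (i + min_complementary_length)))
           ((PySem.List.slice s2 (some j) (some (j + min_complementary_length))).reverse)))
  then [("has_complementarity", true), ("end_complementarity", false)]
  else
    let e := min 5 min_complementary_length
    let endc := is_complementary (PySem.List.slice s1 (some (-e)) none)
      ((PySem.List.slice s2 (some (-e)) none).reverse)
    [("has_complementarity", false), ("end_complementarity", endc)]

-- ===== PORT B =====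
-- the 'for c in reversed(s)' loop of B's revcomp, with its early 'return None'
def pvRevcompGo : List Char → List Char → Option (List Char)
  | out, [] => some out
  | out, c :: rest =>
      match pvPairs.get? c with
      | none => none
      | some d => pvRevcompGo (out ++ [d]) rest

def pvRevcomp? (s : List Char) : Option (List Char) := pvRevcompGo [] s.reverse

def check_complementarity_alt (seq1 : String) (seq2 : String) (min_complementary_length : Int) : List (String × Bool) :=
  let s1 := seq1.toList
  let s2 := seq2.toList
  let k := min_complementary_length
  if k ≤ 0 then [("has_complementarity", true), ("end_complementarity", false)]
  else
  -- the set comprehension {seq2[j:j+k] for j in range(…)}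
  let kmers2 : PySem.Set (List Char) :=
    PySem.Set.ofList ((PySem.List.pyRange 0 ((s2.length : Int) - k + 1) 1).map
      (fun j => PySem.List.slice s2 (some j) (some (j + k))))
  if (PySem.List.pyRange 0 ((s1.length : Int) - k + 1) 1).any (fun i =>
       match pvRevcomp? (PySem.List.slice s1 (some i) (some (i + k))) with
       | none => false
       | some rc => kmers2.contains rc)
  then [("has_complementarity", true), ("end_complementarity", false)]
  else
    let e := min 5 k
    let t1 := PySem.List.slice s1 (some (-e)) none
    let t2 := PySem.List.slice s2 (some (-e)) none
    let endc := t1.length == t2.length && (pvRevcomp? t1 == some t2)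
    [("has_complementarity", false), ("end_complementarity", endc)]

-- ===== PRECONDITION & SPEC =====
def Spec_check_complementarity (seq1 : String) (seq2 : String) (min_complementary_length : Int) (out : List (String × Bool)) : Prop := out = check_complementarity_alt seq1 seq2 min_complementary_length
instance (seq1 : String) (seq2 : String) (min_complementary_length : Int) (out : List (String × Bool)) : Decidable (Spec_check_complementarity seq1 seq2 min_complementary_length out) := by unfold Spec_check_complementarity; infer_instance

-- ===== CLAIM (what is proved, stated in full; the proofs are below) =====
def Claim_equal_check_complementarity : Prop := ∀ (seq1 : String) (seq2 : String) (min_complementary_length : Int), Dom_check_complementarity seq1 seq2 min_complementary_length → Spec_check_complementarity seq1 seq2 min_complementary_length (check_complementarity seq1 seq2 min_complementary_length)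

-- ===== LEMMAS AND PROOFS =====

-- complement map applied char-wise (spec helper for the proofs)
def pvCmap? : List Char → Option (List Char)
  | [] => some []
  | c :: r =>
      match pvPairs.get? c, pvCmap? r with
      | some d, some t => some (d :: t)
      | _, _ => none

theorem pvRevcompGo_eq (l : List Char) : ∀ out, pvRevcompGo out l = (pvCmap? l).map (out ++ ·) := by
  induction l with
  | nil => intro out; simp [pvRevcompGo, pvCmap?]
  | cons c r ih =>
      intro out
      simp only [pvRevcompGo, pvCmap?]
      cases h : pvPairs.get? c with
      | none => simp
      | some d =>
          show pvRevcompGo (out ++ [d]) r = _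
          rw [ih]
          cases pvCmap? r <;> simp

theorem pvCmap?_append (l m : List Char) :
    pvCmap? (l ++ m) = match pvCmap? l, pvCmap? m with
      | some a, some b => some (a ++ b)
      | _, _ => none := by
  induction l with
  | nil => cases h : pvCmap? m <;> simp [pvCmap?, h]
  | cons c r ih =>
      simp only [List.cons_append, pvCmap?, ih]
      cases pvPairs.get? c <;> cases pvCmap? r <;> cases pvCmap? m <;> simp

theorem pvCmap?_reverse (l : List Char) : pvCmap? l.reverse = (pvCmap? l).map List.reverse := by
  induction l with
  | nil => simp [pvCmap?]
  | cons c r ih =>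
      simp only [List.reverse_cons, pvCmap?_append, ih, pvCmap?]
      cases pvPairs.get? c <;> cases pvCmap? r <;> simp

theorem pvCmap?_length {l t : List Char} (h : pvCmap? l = some t) : t.length = l.length := by
  induction l generalizing t with
  | nil => simp [pvCmap?] at h; simp [← h]
  | cons c r ih =>
      simp only [pvCmap?] at h
      cases hc : pvPairs.get? c with
      | none => rw [hc] at h; exact absurd h (by simp)
      | some d =>
          rw [hc] at h
          cases hr : pvCmap? r with
          | none => rw [hr] at h; exact absurd h (by simp)
          | some u => rw [hr] at h; simp at h; simp [← h, ih hr]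

-- A's is_complementary a b is exactly 'pvCmap? a = some b'
theorem isComp_eq_cmap (a : List Char) : ∀ b : List Char, is_complementary a b = (pvCmap? a == some b) := by
  induction a with
  | nil =>
      intro b
      cases b with
      | nil => rfl
      | cons d t => simp [is_complementary, pvCmap?]
  | cons c r ih =>
      intro b
      cases b with
      | nil =>
          simp only [is_complementary, pvCmap?]
          rw [if_pos (by simp)]
          cases pvPairs.get? c <;> cases pvCmap? r <;> simp
      | cons d t =>
          simp only [is_complementary, List.length_cons, ne_eq, add_left_inj,
            List.zip_cons_cons, pvIsCompLoop, pvCmap?]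
          by_cases hl : r.length = t.length
          · rw [if_neg (not_not_intro hl)]
            cases hc : pvPairs.get? c with
            | none => simp
            | some d' =>
                by_cases hdd : d = d'
                · subst hdd
                  rw [if_neg (by simp)]
                  have hr := ih t
                  unfold is_complementary at hr
                  rw [if_neg (not_not_intro hl)] at hr
                  rw [hr]
                  cases pvCmap? r <;> simp
                · rw [if_pos (by simp [hdd])]
                  cases pvCmap? r with
                  | none => simp
                  | some u =>
                      rw [eq_comm, beq_eq_false_iff_ne]
                      intro he
                      injection he with he'
                      injection he' with h1 _
                      exact hdd h1.symm
          · rw [if_pos hl]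
            cases hc : pvPairs.get? c with
            | none => simp
            | some d' =>
                cases hcr : pvCmap? r with
                | none => simp
                | some u =>
                    have hlen := pvCmap?_length hcr
                    rw [eq_comm, beq_eq_false_iff_ne]
                    intro he
                    injection he with he'
                    injection he' with _ h2
                    exact hl (by rw [← hlen, h2])

-- the bridge: A's window test against a reversed window is B's revcomp equality
theorem isComp_rev_eq (a v : List Char) : is_complementary a v.reverse = (pvRevcomp? a == some v) := by
  rw [isComp_eq_cmap]
  unfold pvRevcomp?
  rw [pvRevcompGo_eq, pvCmap?_reverse]
  cases h : pvCmap? a with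
  | none => simp
  | some t =>
      simp only [Option.map_some, List.nil_append]
      rw [Bool.eq_iff_iff]
      simp only [beq_iff_eq, Option.some.injEq]
      constructor
      · rintro rfl; simp
      · rintro rfl; simp

theorem pvRevcomp?_length {t1 t2 : List Char} (h : pvRevcomp? t1 = some t2) :
    t2.length = t1.length := by
  unfold pvRevcomp? at h
  rw [pvRevcompGo_eq] at h
  cases hc : pvCmap? t1.reverse with
  | none => rw [hc] at h; exact absurd h (by simp)
  | some u =>
      rw [hc] at h
      simp at h
      rw [← h]
      simpa using pvCmap?_length hc

-- A's end-of-sequence test equals B's length-guarded revcomp equality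
theorem end_eq (t1 t2 : List Char) :
    (pvRevcomp? t1 == some t2) = ((t1.length == t2.length) && (pvRevcomp? t1 == some t2)) := by
  cases h : pvRevcomp? t1 == some t2
  · simp
  · have h' : pvRevcomp? t1 = some t2 := by simpa using h
    simp [pvRevcomp?_length h']

-- A's inner scan over seq2's windows equals B's set-membership probe
theorem inner_eq (s1 s2 : List Char) (k : Int) (i : Int) :
    ((PySem.List.pyRange 0 ((s2.length : Int) - k + 1) 1).any (fun j =>
        is_complementary (PySem.List.slice s1 (some i) (some (i + k)))
          ((PySem.List.slice s2 (some j) (some (j + k))).reverse)))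
    = (match pvRevcomp? (PySem.List.slice s1 (some i) (some (i + k))) with
       | none => false
       | some rc => PySem.Set.contains
           (PySem.Set.ofList ((PySem.List.pyRange 0 ((s2.length : Int) - k + 1) 1).map
             (fun j => PySem.List.slice s2 (some j) (some (j + k))))) rc) := by
  simp only [isComp_rev_eq]
  cases h : pvRevcomp? (PySem.List.slice s1 (some i) (some (i + k))) with
  | none => simp
  | some rc =>
      rw [Bool.eq_iff_iff]
      simp only [List.any_eq_true, beq_iff_eq, Option.some.injEq,
        PySem.Set.contains, List.contains_eq_mem, decide_eq_true_eq,
        PySem.Set.mem_ofList, List.mem_map]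
      constructor
      · rintro ⟨j, hj, hrc⟩; exact ⟨j, hj, hrc.symm⟩
      · rintro ⟨j, hj, hrc⟩; exact ⟨j, hj, hrc.symm⟩

-- ===== VERDICT (by name: the statement is the Claim_ definition above) =====
-- for k ≤ 0 both windows seq[i:i+k] at i = -k are empty, so A finds a match at once
theorem slice_to_zero (xs : List Char) (a : Int) :
    PySem.List.slice xs (some a) (some 0) = [] := by
  simp [PySem.List.slice, PySem.List.clampIdx]

theorem condA_of_nonpos (s1 s2 : List Char) (k : Int) (hk : k ≤ 0) :
    ((PySem.List.pyRange 0 ((s1.length : Int) - k + 1) 1).any (fun i =>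
       (PySem.List.pyRange 0 ((s2.length : Int) - k + 1) 1).any (fun j =>
         is_complementary (PySem.List.slice s1 (some i) (some (i + k)))
           ((PySem.List.slice s2 (some j) (some (j + k))).reverse)))) = true := by
  rw [List.any_eq_true]
  refine ⟨-k, ?_, ?_⟩
  · rw [PySem.List.mem_pyRange_one]
    omega
  · rw [List.any_eq_true]
    refine ⟨-k, ?_, ?_⟩
    · rw [PySem.List.mem_pyRange_one]
      omega
    · have h0 : (-k) + k = 0 := by omega
      rw [h0, slice_to_zero s1 (-k), slice_to_zero s2 (-k)]
      rfl

theorem check_complementarity_spec : Claim_equal_check_complementarity := by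
  intro seq1 seq2 k _
  unfold Spec_check_complementarity
  simp only [check_complementarity, check_complementarity_alt]
  by_cases hk : k ≤ 0
  · rw [if_pos hk, condA_of_nonpos seq1.toList seq2.toList k hk, if_pos rfl]
  · rw [if_neg hk]
    simp only [inner_eq]
    cases hc : (PySem.List.pyRange 0 ((seq1.toList.length : Int) - k + 1) 1).any (fun i =>
        match pvRevcomp? (PySem.List.slice seq1.toList (some i) (some (i + k))) with
        | none => false
        | some rc => PySem.Set.contains
            (PySem.Set.ofList ((PySem.List.pyRange 0 ((seq2.toList.length : Int) - k + 1) 1).map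
              (fun j => PySem.List.slice seq2.toList (some j) (some (j + k))))) rc) with
    | true => simp
    | false =>
        simp only [Bool.false_eq_true, if_false]
        rw [isComp_rev_eq, ← end_eq]
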